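-- pv_equiv track=rewrite | github.com/songjun-wu/EcoTWIN | python/run_model/forward_post.py | split_indices
-- ===== SOURCE A (Python) =====
-- def split_indices(n_tasks, n_cores):
--     base = n_tasks // n_cores
--     extra = n_tasks % n_cores
--     sizes = [base + 1 if i < extra else base for i in range(n_cores)]
--     indices = []
--     start = 0
--     for size in sizes:
--         indices.append((start, start + size))
--         start += size
--     return indices
-- ===== SOURCE B (Python) =====
-- def split_indices(n_tasks, n_cores):
--     base, extra = divmod(n_tasks, n_cores)
--     return [(i * base + min(i, extra), (i + 1) * base + min(i + 1, extra))
--             for i in range(n_cores)]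
-- ===== Notes on version B (the rewrite author's own statement) =====
-- stated objective: simpler
-- what changed: Replaces the sizes list plus running-start accumulator loop with a single comprehension computing each chunk's boundaries in closed form (i*base + min(i, extra)).
import Mathlib
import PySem

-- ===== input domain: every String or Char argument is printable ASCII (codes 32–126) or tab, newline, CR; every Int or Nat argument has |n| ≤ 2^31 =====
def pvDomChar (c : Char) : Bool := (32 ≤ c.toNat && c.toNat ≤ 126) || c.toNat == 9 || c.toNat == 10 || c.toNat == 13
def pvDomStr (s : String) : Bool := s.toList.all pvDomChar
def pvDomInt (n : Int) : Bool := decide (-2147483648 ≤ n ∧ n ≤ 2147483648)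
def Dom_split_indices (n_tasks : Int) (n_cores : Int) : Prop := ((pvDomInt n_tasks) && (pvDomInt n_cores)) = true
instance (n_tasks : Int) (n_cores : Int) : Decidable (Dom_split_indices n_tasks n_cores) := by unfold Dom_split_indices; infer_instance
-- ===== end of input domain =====

-- B computes each chunk's boundaries in closed form (i*base + min(i, extra)) instead of A's sizes list and running-start accumulator.


-- ===== PORT A =====
def split_indices (n_tasks : Int) (n_cores : Int) : List (Int × Int) :=
  let base := PySem.Int.floordiv n_tasks n_cores
  let extra := PySem.Int.mod n_tasks n_cores
  let sizes := (PySem.List.pyRange 0 n_cores 1).map (fun i => if i < extra then base + 1 else base)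
  let r := sizes.foldl (fun (st : List (Int × Int) × Int) size =>
      (st.1 ++ [(st.2, st.2 + size)], st.2 + size)) ([], 0)
  r.1

-- ===== PORT B =====
def split_indices_alt (n_tasks : Int) (n_cores : Int) : List (Int × Int) :=
  let base := PySem.Int.floordiv n_tasks n_cores
  let extra := PySem.Int.mod n_tasks n_cores
  (PySem.List.pyRange 0 n_cores 1).map
    (fun i => (i * base + min i extra, (i + 1) * base + min (i + 1) extra))

-- ===== PRECONDITION & SPEC =====
-- Pre_ excludes n_cores = 0, on which Python's '//' raises ZeroDivisionError.
def Pre_split_indices (n_tasks : Int) (n_cores : Int) : Prop := n_cores ≠ 0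
instance (n_tasks : Int) (n_cores : Int) : Decidable (Pre_split_indices n_tasks n_cores) := by unfold Pre_split_indices; infer_instance
def pvWitness_split_indices : Int × Int := (10, 3)
def Spec_split_indices (n_tasks : Int) (n_cores : Int) (out : List (Int × Int)) : Prop := out = split_indices_alt n_tasks n_cores
instance (n_tasks : Int) (n_cores : Int) (out : List (Int × Int)) : Decidable (Spec_split_indices n_tasks n_cores out) := by unfold Spec_split_indices; infer_instance

-- ===== CLAIM (what is proved, stated in full; the proofs are below) =====
def Claim_equal_split_indices : Prop := ∀ (n_tasks : Int) (n_cores : Int), Dom_split_indices n_tasks n_cores → Pre_split_indices n_tasks n_cores → Spec_split_indices n_tasks n_cores (split_indices n_tasks n_cores)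

-- ===== LEMMAS AND PROOFS =====

-- Loop invariant: A's fold over the sizes of range [a, a+n) started at position
-- a*base + min a extra appends exactly B's closed-form pairs and ends at (a+n)*base + min (a+n) extra.
lemma split_fold_invariant (base extra : Int) :
    ∀ (n : Nat) (a : Int) (init : List (Int × Int)),
    (((PySem.List.pyRange a (a + n) 1).map (fun i => if i < extra then base + 1 else base)).foldl
        (fun (st : List (Int × Int) × Int) size =>
          (st.1 ++ [(st.2, st.2 + size)], st.2 + size))
        (init, a * base + min a extra))
    = (init ++ (PySem.List.pyRange a (a + n) 1).map
         (fun i => (i * base + min i extra, (i + 1) * base + min (i + 1) extra)),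
       (a + n) * base + min (a + n) extra) := by
  intro n
  induction n with
  | zero =>
    intro a init
    simp
  | succ m ih =>
    intro a init
    rw [PySem.List.pyRange_one_cons (by push_cast; omega : a < a + ((m + 1 : Nat) : Int))]
    have hrange : a + ((m + 1 : Nat) : Int) = (a + 1) + (m : Nat) := by push_cast; ring
    rw [hrange]
    simp only [List.map_cons, List.foldl_cons]
    have hstep : a * base + min a extra + (if a < extra then base + 1 else base)
        = (a + 1) * base + min (a + 1) extra := by
      split_ifs with h
      · have h1 : min a extra = a := by omega
        have h2 : min (a + 1) extra = a + 1 := by omega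
        rw [h1, h2]; ring
      · have h1 : min a extra = extra := by omega
        have h2 : min (a + 1) extra = extra := by omega
        rw [h1, h2]; ring
    rw [hstep]
    rw [ih (a + 1) (init ++ [(a * base + min a extra, (a + 1) * base + min (a + 1) extra)])]
    simp

theorem split_indices_eq (n_tasks n_cores : Int) (h : n_cores ≠ 0) :
    split_indices n_tasks n_cores = split_indices_alt n_tasks n_cores := by
  unfold split_indices split_indices_alt
  by_cases hc : 0 < n_cores
  · have hext : 0 ≤ PySem.Int.mod n_tasks n_cores := by
      rw [PySem.Int.mod_eq_emod_of_pos hc]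
      exact Int.emod_nonneg n_tasks (by omega)
    have key := split_fold_invariant (PySem.Int.floordiv n_tasks n_cores)
      (PySem.Int.mod n_tasks n_cores) n_cores.toNat 0 []
    rw [show ((0:Int) + (n_cores.toNat : Int)) = n_cores from by omega] at key
    rw [show (0 : Int) * (PySem.Int.floordiv n_tasks n_cores) + min 0 (PySem.Int.mod n_tasks n_cores) = 0 from by simp [min_eq_left hext]] at key
    simp only [key]
    simp
  · have hnil : PySem.List.pyRange 0 n_cores 1 = [] :=
      PySem.List.pyRange_one_eq_nil (by omega)
    simp [hnil]

-- ===== VERDICT (by name: the statement is the Claim_ definition above) =====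
theorem split_indices_spec : Claim_equal_split_indices := by
  intro n_tasks n_cores _ hpre
  exact split_indices_eq n_tasks n_cores hpre
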